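-- pv_equiv track=rewrite | github.com/piter2710/Algorytmy | Zadania_Matura/Maj 2025/2_4.py | decimal_to_base3
-- ===== SOURCE A (Python) =====
-- def decimal_to_base3(n):
--     if n == 0:
--         return "0"
--     digits = []
--     while n > 0:
--         digits.append(str(n % 3))
--         n //= 3
--     return "".join(digits[::-1])
-- ===== SOURCE B (Python) =====
-- def _rec_base3(m):
--     if m == 0:
--         return ""
--     return _rec_base3(m // 3) + str(m % 3)
--
-- def decimal_to_base3(n):
--     if n == 0:
--         return "0"
--     if n < 0:
--         return ""
--     return _rec_base3(n)
-- ===== Notes on version B (the rewrite author's own statement) =====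
-- stated objective: alternative
-- what changed: Replaces the explicit digit-list loop plus [::-1] reversal and join with a recursive helper that builds the base-3 string most-significant-first directly on the call stack.
import Mathlib
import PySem

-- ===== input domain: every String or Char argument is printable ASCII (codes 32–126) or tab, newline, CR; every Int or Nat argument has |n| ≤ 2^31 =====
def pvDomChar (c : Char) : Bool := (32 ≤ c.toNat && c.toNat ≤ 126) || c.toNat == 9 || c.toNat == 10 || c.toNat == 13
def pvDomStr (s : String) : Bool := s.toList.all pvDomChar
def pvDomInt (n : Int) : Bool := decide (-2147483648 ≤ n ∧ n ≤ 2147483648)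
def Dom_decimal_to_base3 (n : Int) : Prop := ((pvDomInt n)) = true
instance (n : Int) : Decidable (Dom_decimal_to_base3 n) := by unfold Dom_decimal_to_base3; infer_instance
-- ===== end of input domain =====

-- B replaces A's digit-list loop + [::-1] reversal + join with a recursive helper that
-- builds the base-3 string most-significant-first (alternative decomposition, same cost).


-- ===== PORT A =====
-- the while loop: digits.append(str(n % 3)); n //= 3
def decimal_to_base3_loop (n : Int) (digits : List String) : List String :=
  if n > 0 then
    decimal_to_base3_loop (PySem.Int.floordiv n 3)
      (digits ++ [PySem.Int.toStr (PySem.Int.mod n 3)])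
  else digits
termination_by n.toNat
decreasing_by
  rw [PySem.Int.floordiv_eq_ediv_of_pos (by norm_num)]
  omega

def decimal_to_base3 (n : Int) : String :=
  if n = 0 then "0"
  else
    PySem.Str.join ""
      ((PySem.List.slice? (decimal_to_base3_loop n []) none none (-1)).getD [])

-- ===== PORT B =====
-- helper _rec_base3; in Python it is only ever invoked with m ≥ 0 (the top level
-- returns "" for n < 0 first), so the 'm ≤ 0' totality guard coincides with 'm == 0' there
def decimal_to_base3_rec (m : Int) : String :=
  if m ≤ 0 then ""
  else decimal_to_base3_rec (PySem.Int.floordiv m 3) ++ PySem.Int.toStr (PySem.Int.mod m 3)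
termination_by m.toNat
decreasing_by
  rw [PySem.Int.floordiv_eq_ediv_of_pos (by norm_num)]
  omega

def decimal_to_base3_alt (n : Int) : String :=
  if n = 0 then "0"
  else if n < 0 then ""
  else decimal_to_base3_rec n

-- ===== PRECONDITION & SPEC =====
def Spec_decimal_to_base3 (n : Int) (out : String) : Prop := out = decimal_to_base3_alt n
instance (n : Int) (out : String) : Decidable (Spec_decimal_to_base3 n out) := by unfold Spec_decimal_to_base3; infer_instance

-- ===== CLAIM (what is proved, stated in full; the proofs are below) =====
def Claim_equal_decimal_to_base3 : Prop := ∀ (n : Int), Dom_decimal_to_base3 n → Spec_decimal_to_base3 n (decimal_to_base3 n)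

-- ===== LEMMAS AND PROOFS =====

-- with the empty separator, Chars.join is just flatten
theorem pv_join_nil_eq_flatten (l : List (List Char)) :
    PySem.Chars.join [] l = l.flatten := by
  induction l with
  | nil => simp [PySem.Chars.join_nil]
  | cons p rest ih =>
    cases rest with
    | nil => simp [PySem.Chars.join_singleton]
    | cons q rest' =>
      rw [PySem.Chars.join_cons_cons]
      simp [ih]

-- the accumulator of A's loop is only ever appended to
-- the loop does nothing once n ≤ 0
theorem pv_loop_done (n : Int) (ds : List String) (hn : ¬ n > 0) :
    decimal_to_base3_loop n ds = ds := by
  rw [decimal_to_base3_loop]; simp [hn]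

theorem pv_loop_append (k : Nat) (n : Int) (hk : n.toNat ≤ k) (ds : List String) :
    decimal_to_base3_loop n ds = ds ++ decimal_to_base3_loop n [] := by
  induction k generalizing n ds with
  | zero =>
    have hn : ¬ n > 0 := by omega
    rw [pv_loop_done n ds hn, pv_loop_done n [] hn]
    simp
  | succ k ih =>
    by_cases hn : n > 0
    · have hd : PySem.Int.floordiv n 3 = n / 3 :=
        PySem.Int.floordiv_eq_ediv_of_pos (by norm_num)
      have hk' : (PySem.Int.floordiv n 3).toNat ≤ k := by rw [hd]; omega
      rw [decimal_to_base3_loop]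
      conv_rhs => rw [decimal_to_base3_loop]
      simp only [hn, if_pos, List.nil_append]
      rw [ih _ hk' (ds ++ [PySem.Int.toStr (PySem.Int.mod n 3)]),
        ih _ hk' [PySem.Int.toStr (PySem.Int.mod n 3)]]
      simp
    · rw [pv_loop_done n ds hn, pv_loop_done n [] hn]
      simp

-- joining A's reversed digit list gives exactly B's recursive string
theorem pv_loop_rec (k : Nat) (n : Int) (hk : n.toNat ≤ k) (hn : 0 ≤ n) :
    (PySem.Str.join "" (decimal_to_base3_loop n []).reverse).toList =
      (decimal_to_base3_rec n).toList := by
  induction k generalizing n with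
  | zero =>
    have h0 : n = 0 := by omega
    subst h0
    rw [decimal_to_base3_loop, decimal_to_base3_rec]
    simp [PySem.Str.join]
  | succ k ih =>
    by_cases hpos : n > 0
    · have hd : PySem.Int.floordiv n 3 = n / 3 :=
        PySem.Int.floordiv_eq_ediv_of_pos (by norm_num)
      have hk' : (PySem.Int.floordiv n 3).toNat ≤ k := by rw [hd]; omega
      have hn' : 0 ≤ PySem.Int.floordiv n 3 := by rw [hd]; omega
      rw [decimal_to_base3_loop]
      simp only [hpos, if_pos]
      rw [pv_loop_append (k := (PySem.Int.floordiv n 3).toNat) _ le_rfl]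
      rw [decimal_to_base3_rec]
      have hle : ¬ n ≤ 0 := by omega
      simp only [hle, if_neg, not_false_iff]
      have := ih (PySem.Int.floordiv n 3) hk' hn'
      rw [hd] at this
      simp only [PySem.Str.join, String.toList_ofList,
        show ("" : String).toList = [] from rfl] at this ⊢
      simp only [pv_join_nil_eq_flatten] at this ⊢
      rw [List.map_reverse] at this
      simp [String.toList_append, this]
    · have h0 : n = 0 := by omega
      subst h0
      rw [decimal_to_base3_loop, decimal_to_base3_rec]
      simp [PySem.Str.join]

-- ===== VERDICT (by name: the statement is the Claim_ definition above) =====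
theorem decimal_to_base3_spec : Claim_equal_decimal_to_base3 := by
  intro n _
  unfold Spec_decimal_to_base3 decimal_to_base3 decimal_to_base3_alt
  by_cases h0 : n = 0
  · simp [h0]
  · simp only [h0, if_neg, not_false_iff]
    by_cases hneg : n < 0
    · have hn : ¬ n > 0 := by omega
      rw [decimal_to_base3_loop]
      simp [hn, hneg, PySem.List.slice?_none_none_neg_one, PySem.Str.join]
    · have hn : 0 ≤ n := by omega
      simp only [hneg, if_neg, not_false_iff]
      rw [PySem.List.slice?_none_none_neg_one]
      apply String.toList_inj.mp
      simpa using pv_loop_rec n.toNat n le_rfl hn
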